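-- pv_equiv track=rewrite | github.com/Belerafon/CookaReq | app/util/text_inspect.py | _split_lines_sample
-- ===== SOURCE A (Python) =====
-- from collections.abc import Iterable
--
-- def _split_lines_sample(text: str, limit: int) -> Iterable[str]:
--     count = 0
--     start = 0
--     length = len(text)
--     while start < length and count < limit:
--         end = text.find("\n", start)
--         if end == -1:
--             yield text[start:]
--             return
--         yield text[start:end]
--         start = end + 1
--         count += 1
-- ===== SOURCE B (Python) =====
-- from collections.abc import Iterable
--
--
-- def _split_lines_sample(text: str, limit: int) -> Iterable[str]:
--     lines = text.split("\n")
--     if lines and lines[-1] == "":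
--         lines.pop()
--     for i, line in enumerate(lines):
--         if i >= limit:
--             break
--         yield line
-- ===== Notes on version B (the rewrite author's own statement) =====
-- stated objective: simpler
-- what changed: replaces the incremental find('\n')/slice scanning loop with: split the whole text once, drop the single trailing empty segment, then yield the first `limit` segments via enumerate
import Mathlib
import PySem

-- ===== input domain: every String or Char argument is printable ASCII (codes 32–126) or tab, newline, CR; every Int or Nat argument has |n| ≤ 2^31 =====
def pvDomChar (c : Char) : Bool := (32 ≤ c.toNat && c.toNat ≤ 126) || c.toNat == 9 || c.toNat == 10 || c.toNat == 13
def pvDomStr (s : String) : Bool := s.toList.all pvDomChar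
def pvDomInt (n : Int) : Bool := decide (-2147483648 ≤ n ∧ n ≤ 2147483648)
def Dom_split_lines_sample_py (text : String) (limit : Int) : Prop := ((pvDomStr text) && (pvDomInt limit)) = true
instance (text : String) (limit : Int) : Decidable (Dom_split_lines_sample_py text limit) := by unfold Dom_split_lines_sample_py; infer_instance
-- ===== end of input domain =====

-- B replaces A's incremental find/slice scanning loop by: split the text once, drop the
-- single trailing empty segment, take the first `limit` segments (objective: simpler).

-- ===== PORT A =====
-- the while loop of A: state (start, count); text.find("\n", start) = Str/Chars.findFrom
def splitLinesGoA (cs : List Char) (limit : Int) (start : Nat) (count : Int) : List String :=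
  if h : start < cs.length ∧ count < limit then
    let e := PySem.Chars.findFrom cs ['\n'] (start : Int)
    if he : e = -1 then
      [String.ofList (PySem.Chars.slice cs (some (start : Int)) none)]   -- yield text[start:]; return
    else
      String.ofList (PySem.Chars.slice cs (some (start : Int)) (some e)) ::   -- yield text[start:end]
        splitLinesGoA cs limit (e.toNat + 1) (count + 1)
  else []
termination_by cs.length - start
decreasing_by
  have hs := PySem.Chars.findFrom_natCast_spec cs ['\n'] start (le_of_lt h.1) he
  have _h1 : ((start : Int)) ≤ PySem.Chars.findFrom cs ['\n'] (start : Int) := hs.1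
  have h2 := hs.2.1.length_le
  simp only [List.length_cons, List.length_nil, List.length_drop] at h2
  omega


def split_lines_sample_py (text : String) (limit : Int) : List String :=
  splitLinesGoA text.toList limit 0 0

-- ===== PORT B =====
def split_lines_sample_py_alt (text : String) (limit : Int) : List String :=
  let lines := (PySem.Str.split? text "\n").getD []          -- lines = text.split("\n")
  let lines := if lines ≠ [] ∧ PySem.List.pyGet? lines (-1) = some "" then lines.dropLast else lines
  ((PySem.List.enumerate lines).takeWhile (fun p => decide (p.1 < limit))).map Prod.snd
    -- for i, line in enumerate(lines): if i >= limit: break; yield line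

-- ===== PRECONDITION & SPEC =====
def Spec_split_lines_sample_py (text : String) (limit : Int) (out : List String) : Prop := out = split_lines_sample_py_alt text limit
instance (text : String) (limit : Int) (out : List String) : Decidable (Spec_split_lines_sample_py text limit out) := by unfold Spec_split_lines_sample_py; infer_instance

-- ===== CLAIM (what is proved, stated in full; the proofs are below) =====
def Claim_equal_split_lines_sample_py : Prop := ∀ (text : String) (limit : Int), Dom_split_lines_sample_py text limit → Spec_split_lines_sample_py text limit (split_lines_sample_py text limit)

-- ===== LEMMAS AND PROOFS =====

-- reference: the segments of a char list between '\n's (= Python's text.split("\n"))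
def pvSegs : List Char → List (List Char)
  | [] => [[]]
  | c :: r =>
    if c = '\n' then [] :: pvSegs r
    else
      match pvSegs r with
      | [] => [[c]]           -- unreachable
      | s :: ss => (c :: s) :: ss

-- reference: drop a trailing empty segment
def pvTrim (ss : List (List Char)) : List (List Char) :=
  if ss.getLast? = some [] then ss.dropLast else ss

lemma pvSegs_ne_nil (l : List Char) : pvSegs l ≠ [] := by
  cases l with
  | nil => simp [pvSegs]
  | cons c r =>
    simp only [pvSegs]
    split_ifs
    · simp
    · cases h : pvSegs r <;> simp

lemma pvSegs_headI_tail (l : List Char) : (pvSegs l).headI :: (pvSegs l).tail = pvSegs l := by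
  cases h : pvSegs l with
  | nil => exact absurd h (pvSegs_ne_nil l)
  | cons s ss => simp [List.headI]

lemma go_step_nl (n : Nat) (rest cur : List Char) (acc : List (List Char)) :
    PySem.Chars.splitOn.go ['\n'] (n + 1) ('\n' :: rest) cur acc =
      PySem.Chars.splitOn.go ['\n'] n rest [] (cur.reverse :: acc) := by
  simp [PySem.Chars.splitOn.go, List.isPrefixOf]

lemma go_step_other (n : Nat) (c : Char) (hc : c ≠ '\n') (rest cur : List Char) (acc : List (List Char)) :
    PySem.Chars.splitOn.go ['\n'] (n + 1) (c :: rest) cur acc =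
      PySem.Chars.splitOn.go ['\n'] n rest (c :: cur) acc := by
  simp only [PySem.Chars.splitOn.go, List.isPrefixOf, Bool.and_true]
  rw [if_neg]
  simp only [beq_iff_eq]
  exact fun h => hc h.symm

lemma splitOn_go_eq (fuel : Nat) : ∀ (l cur : List Char) (acc : List (List Char)),
    l.length ≤ fuel →
    PySem.Chars.splitOn.go ['\n'] fuel l cur acc =
      acc.reverse ++ (cur.reverse ++ (pvSegs l).headI) :: (pvSegs l).tail := by
  induction fuel with
  | zero =>
    intro l cur acc hl
    have : l = [] := List.length_eq_zero_iff.mp (Nat.le_zero.mp hl)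
    subst this
    simp [PySem.Chars.splitOn.go, pvSegs, List.headI]
  | succ n ih =>
    intro l cur acc hl
    cases l with
    | nil => simp [PySem.Chars.splitOn.go, pvSegs, List.headI]
    | cons c rest =>
      have hr : rest.length ≤ n := by simpa using hl
      by_cases hc : c = '\n'
      · subst hc
        rw [go_step_nl, ih rest [] (cur.reverse :: acc) hr]
        cases h : pvSegs rest with
        | nil => exact absurd h (pvSegs_ne_nil rest)
        | cons s ss => simp [pvSegs, h, List.headI]
      · rw [go_step_other n c hc, ih rest (c :: cur) acc hr]
        cases h : pvSegs rest with
        | nil => exact absurd h (pvSegs_ne_nil rest)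
        | cons s ss => simp [pvSegs, hc, h, List.headI]

lemma splitOn_nl (cs : List Char) : PySem.Chars.splitOn cs ['\n'] = pvSegs cs := by
  show PySem.Chars.splitOn.go ['\n'] (cs.length + 1) cs [] [] = pvSegs cs
  rw [splitOn_go_eq (cs.length + 1) cs [] [] (by omega)]
  simpa using pvSegs_headI_tail cs

-- find "\n" characterised by takeWhile
lemma find_go_nl (l : List Char) : ∀ (k : Nat),
    PySem.Chars.find.go ['\n'] l k =
      if '\n' ∈ l then ((k : Int) + ((l.takeWhile (fun c => c != '\n')).length : Int)) else -1 := by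
  induction l with
  | nil => intro k; simp [PySem.Chars.find.go]
  | cons c rest ih =>
    intro k
    by_cases hc : c = '\n'
    · subst hc
      simp [PySem.Chars.find.go, List.isPrefixOf, List.takeWhile]
    · have h1 : PySem.Chars.find.go ['\n'] (c :: rest) k = PySem.Chars.find.go ['\n'] rest (k + 1) := by
        simp only [PySem.Chars.find.go, List.isPrefixOf, Bool.and_true]
        rw [if_neg]
        simp only [beq_iff_eq]
        exact fun h => hc h.symm
      rw [h1, ih (k + 1)]
      simp only [List.takeWhile, List.mem_cons]
      have : (c != '\n') = true := by simpa using hc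
      rw [this]
      by_cases h : '\n' ∈ rest
      · rw [if_pos h, if_pos (Or.inr h)]
        simp only [List.length_cons]
        push_cast
        ring
      · rw [if_neg h, if_neg (by simp [h, Ne.symm hc])]

lemma find_nl (l : List Char) :
    PySem.Chars.find l ['\n'] =
      if '\n' ∈ l then (((l.takeWhile (fun c => c != '\n')).length : Int)) else -1 := by
  show PySem.Chars.find.go ['\n'] l 0 = _
  rw [find_go_nl l 0]
  simp

lemma pvSegs_of_not_mem {l : List Char} (h : '\n' ∉ l) : pvSegs l = [l] := by
  induction l with
  | nil => simp [pvSegs]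
  | cons c r ih =>
    simp only [List.mem_cons, not_or] at h
    have hc : ¬ c = '\n' := fun hh => h.1 hh.symm
    simp [pvSegs, hc, ih h.2]

lemma pvSegs_of_mem {l : List Char} (h : '\n' ∈ l) :
    pvSegs l = l.takeWhile (fun c => c != '\n') :: pvSegs ((l.dropWhile (fun c => c != '\n')).tail) := by
  induction l with
  | nil => simp at h
  | cons c r ih =>
    by_cases hc : c = '\n'
    · subst hc; simp [pvSegs, List.takeWhile, List.dropWhile]
    · have hr : '\n' ∈ r := by
        rcases List.mem_cons.mp h with h' | h'
        · exact absurd h'.symm hc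
        · exact h'
      have hcb : (c != '\n') = true := by simpa using hc
      simp only [pvSegs, if_neg hc, ih hr, List.takeWhile, List.dropWhile, hcb]

lemma pvTrim_cons {s : List Char} {ss : List (List Char)} (h : ss ≠ []) :
    pvTrim (s :: ss) = s :: pvTrim ss := by
  unfold pvTrim
  cases ss with
  | nil => exact absurd rfl h
  | cons b bs =>
    rw [List.getLast?_cons_cons, List.dropLast_cons₂]
    split_ifs <;> rfl

-- the main characterisation of A's loop
lemma splitLinesGoA_eq (cs : List Char) (limit : Int) (start : Nat) (count : Int) :
    start ≤ cs.length →
    splitLinesGoA cs limit start count =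
      ((pvTrim (pvSegs (cs.drop start))).take (limit - count).toNat).map String.ofList := by
  induction start, count using splitLinesGoA.induct (cs := cs) (limit := limit) with
  | case1 start count h e he =>
    intro hb
    rw [show e = PySem.Chars.findFrom cs ['\n'] (start : Int) from rfl] at he
    have hfF := PySem.Chars.findFrom_natCast cs ['\n'] start hb
    have hnot : '\n' ∉ cs.drop start := by
      by_cases hm : '\n' ∈ cs.drop start
      · exfalso
        rw [hfF, find_nl, if_pos hm, if_neg (by omega)] at he
        omega
      · exact hm
    have hrest : cs.drop start ≠ [] := by
      have : 0 < (cs.drop start).length := by rw [List.length_drop]; omega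
      exact List.ne_nil_of_length_pos this
    rw [splitLinesGoA]
    simp only [dif_pos h, dif_pos he]
    rw [pvSegs_of_not_mem hnot]
    unfold pvTrim
    rw [List.getLast?_singleton, if_neg (by simpa using hrest)]
    have hcnt : (limit - count).toNat = (limit - count - 1).toNat + 1 := by
      have := h.2; omega
    rw [hcnt, List.take_succ_cons, List.take_nil, List.map_singleton]
    simp only [PySem.Chars.slice_eq_listSlice]
    rw [PySem.List.slice_from_natCast]
  | case2 start count h e he ih =>
    intro hb
    rw [show e = PySem.Chars.findFrom cs ['\n'] (start : Int) from rfl] at he ih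
    have hfF := PySem.Chars.findFrom_natCast cs ['\n'] start hb
    have hm : '\n' ∈ cs.drop start := by
      by_cases hm : '\n' ∈ cs.drop start
      · exact hm
      · exfalso
        apply he
        rw [hfF, find_nl, if_neg hm]
        simp
    have hfind : PySem.Chars.find (cs.drop start) ['\n'] =
        ((List.takeWhile (fun c => c != '\n') (cs.drop start)).length : Int) := by
      rw [find_nl, if_pos hm]
    have he2 : PySem.Chars.findFrom cs ['\n'] (start : Int) =
        (start : Int) + ((List.takeWhile (fun c => c != '\n') (cs.drop start)).length : Int) := by
      rw [hfF, hfind, if_neg (by omega)]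
    have hdw : List.dropWhile (fun c => c != '\n') (cs.drop start) ≠ [] := by
      intro hnil
      have := List.dropWhile_eq_nil_iff.mp hnil '\n' hm
      simp at this
    have hlensum : (List.takeWhile (fun c => c != '\n') (cs.drop start)).length +
        (List.dropWhile (fun c => c != '\n') (cs.drop start)).length = (cs.drop start).length := by
      rw [← List.length_append, List.takeWhile_append_dropWhile]
    have hdwlen : 0 < (List.dropWhile (fun c => c != '\n') (cs.drop start)).length :=
      List.length_pos_of_ne_nil hdw
    have hjlt : (List.takeWhile (fun c => c != '\n') (cs.drop start)).length < (cs.drop start).length := by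
      omega
    have hreslen : (cs.drop start).length = cs.length - start := List.length_drop
    have htoNat : ((start : Int) + ((List.takeWhile (fun c => c != '\n') (cs.drop start)).length : Int)).toNat
        = start + (List.takeWhile (fun c => c != '\n') (cs.drop start)).length := by omega
    have htake : (cs.drop start).take (List.takeWhile (fun c => c != '\n') (cs.drop start)).length
        = List.takeWhile (fun c => c != '\n') (cs.drop start) := by
      have h0 := @List.take_left _ (List.takeWhile (fun c => c != '\n') (cs.drop start))
        (List.dropWhile (fun c => c != '\n') (cs.drop start))
      rwa [List.takeWhile_append_dropWhile] at h0
    have hdropj : (cs.drop start).drop (List.takeWhile (fun c => c != '\n') (cs.drop start)).length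
        = List.dropWhile (fun c => c != '\n') (cs.drop start) := by
      have h0 := @List.drop_left _ (List.takeWhile (fun c => c != '\n') (cs.drop start))
        (List.dropWhile (fun c => c != '\n') (cs.drop start))
      rwa [List.takeWhile_append_dropWhile] at h0
    have hdroptail : cs.drop (start + (List.takeWhile (fun c => c != '\n') (cs.drop start)).length + 1)
        = (List.dropWhile (fun c => c != '\n') (cs.drop start)).tail := by
      rw [← List.drop_one, ← hdropj, List.drop_drop, List.drop_drop]
      congr 1
    rw [splitLinesGoA]
    simp only [dif_pos h, dif_neg he]
    rw [he2, htoNat] at ih ⊢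
    rw [ih (by omega)]
    rw [hdroptail]
    conv_rhs => rw [pvSegs_of_mem hm]
    rw [pvTrim_cons (pvSegs_ne_nil _)]
    have hcnt : (limit - count).toNat = (limit - (count + 1)).toNat + 1 := by
      have := h.2; omega
    rw [hcnt, List.take_succ_cons, List.map_cons]
    congr 1
    simp only [PySem.Chars.slice_eq_listSlice]
    rw [PySem.List.slice_natCast_add, htake]
  | case3 start count h =>
    intro hb
    rw [splitLinesGoA]
    rw [dif_neg h]
    by_cases hs : start < cs.length
    · have hc : ¬ count < limit := fun hc => h ⟨hs, hc⟩
      have : (limit - count).toNat = 0 := by omega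
      simp [this]
    · have hdrop : cs.drop start = [] := List.drop_eq_nil_of_le (by omega)
      simp [hdrop, pvSegs, pvTrim]

-- enumerate + takeWhile(i < limit) is take
lemma enumTake (l : List String) : ∀ (i0 limit : Int),
    (((PySem.List.enumerate l i0).takeWhile (fun p => decide (p.1 < limit))).map Prod.snd) =
      l.take (limit - i0).toNat := by
  induction l with
  | nil => intro i0 limit; simp [PySem.List.enumerate]
  | cons x t ih =>
    intro i0 limit
    simp only [PySem.List.enumerate, List.takeWhile]
    by_cases h : i0 < limit
    · simp only [h, decide_true]
      rw [List.map, ih (i0 + 1) limit]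
      have : (limit - i0).toNat = (limit - (i0 + 1)).toNat + 1 := by omega
      rw [this, List.take_succ_cons]
    · simp only [h, decide_false]
      have : (limit - i0).toNat = 0 := by omega
      simp [this]

lemma pyGet_neg_one {α : Type} (xs : List α) : PySem.List.pyGet? xs (-1) = xs.getLast? := by
  cases xs with
  | nil => rfl
  | cons a t =>
    have hlen : (0:Int) < (a :: t).length := by simp
    simp only [PySem.List.pyGet?, PySem.List.pyIdx?]
    rw [if_neg (by omega), if_pos (by omega)]
    simp [List.getLast?_eq_getElem?]

lemma split_eq_segs (text : String) :
    (PySem.Str.split? text "\n").getD [] = (pvSegs text.toList).map String.ofList := by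
  show (Option.map (fun x => List.map String.ofList x) (PySem.Chars.split? text.toList "\n".toList)).getD [] = _
  rw [show "\n".toList = ['\n'] from rfl]
  simp [PySem.Chars.split?, splitOn_nl]

-- ===== VERDICT (by name: the statement is the Claim_ definition above) =====
theorem split_lines_sample_py_spec : Claim_equal_split_lines_sample_py := by
  intro text limit _
  unfold Spec_split_lines_sample_py split_lines_sample_py split_lines_sample_py_alt
  rw [splitLinesGoA_eq text.toList limit 0 0 (by omega)]
  simp only [List.drop_zero, split_eq_segs, pyGet_neg_one, List.getLast?_map]
  have hne : (pvSegs text.toList).map String.ofList ≠ [] := by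
    simpa using pvSegs_ne_nil text.toList
  by_cases hlast : (pvSegs text.toList).getLast? = some []
  · rw [if_pos ⟨hne, by rw [hlast]; rfl⟩]
    rw [← List.map_dropLast, enumTake]
    unfold pvTrim
    rw [if_pos hlast, ← List.map_take]
  · rw [if_neg]
    · rw [enumTake]
      unfold pvTrim
      rw [if_neg hlast, ← List.map_take]
    · rintro ⟨-, h2⟩
      apply hlast
      rcases Option.map_eq_some_iff.mp h2 with ⟨a, ha, hao⟩
      have : a = [] := by
        have := congrArg String.toList hao
        simpa using this
      rw [ha, this]
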